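-- pv_equiv track=rewrite | github.com/WooilKim/algorithm-practice | programmers/trial_test.py | solution
-- ===== SOURCE A (Python) =====
-- def solution(answers):
--     res = [0, 0, 0]
--     p2 = [2, 1, 2, 3, 2, 4, 2, 5]
--     p3 = [3, 3, 1, 1, 2, 2, 4, 4, 5, 5]
--     for i, a in enumerate(answers):
--         if a == i % 5 + 1:
--             res[0] += 1
--         if a == p2[i % 8]:
--             res[1] += 1
--         if a == p3[i % 10]:
--             res[2] += 1
--
--     m = max(res)
--     answer = list()
--     while m in res:
--         idx = res.index(m)
--         answer.append(idx + 1)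
--         res[idx] = 0
--     return answer
-- ===== SOURCE B (Python) =====
-- def solution(answers):
--     patterns = [[1, 2, 3, 4, 5],
--                 [2, 1, 2, 3, 2, 4, 2, 5],
--                 [3, 3, 1, 1, 2, 2, 4, 4, 5, 5]]
--     scores = [sum(1 for i, a in enumerate(answers) if a == p[i % len(p)]) for p in patterns]
--     best = max(scores)
--     return [i + 1 for i in range(3) if scores[i] == best]
-- ===== Notes on version B (the rewrite author's own statement) =====
-- stated objective: simpler
-- what changed: B scores each of the three answer patterns in its own uniform pass over a list of pattern lists and selects the winners with max plus one filtering comprehension, instead of A's single interleaved scan with per-pattern index arithmetic and its destructive res.index/while selection loop.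
-- outside the precondition, e.g. on solution([6]): A does not finish within the time limit, B returns [1, 2, 3]; on solution([]): A does not finish within the time limit, B returns [1, 2, 3]
import Mathlib
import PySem

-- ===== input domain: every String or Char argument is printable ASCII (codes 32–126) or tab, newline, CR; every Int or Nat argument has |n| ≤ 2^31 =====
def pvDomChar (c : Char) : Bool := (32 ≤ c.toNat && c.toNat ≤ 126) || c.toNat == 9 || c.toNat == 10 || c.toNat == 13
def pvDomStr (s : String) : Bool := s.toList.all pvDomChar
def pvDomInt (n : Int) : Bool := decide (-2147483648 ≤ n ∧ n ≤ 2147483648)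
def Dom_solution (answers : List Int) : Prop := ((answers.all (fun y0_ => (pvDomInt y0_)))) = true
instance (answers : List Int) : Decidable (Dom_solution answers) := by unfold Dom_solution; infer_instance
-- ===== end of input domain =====

-- B re-implements A by three independent per-pattern passes plus a max/filter selection,
-- replacing A's single interleaved scan and its destructive index/while selection loop (objective: simpler).

-- ===== PORT A =====
-- loop body of A's 'for i, a in enumerate(answers)' (res has the fixed shape [r0, r1, r2])
def pvStepA (res : List Int) (ia : Int × Int) : List Int :=
  let res := if ia.2 == PySem.Int.mod ia.1 5 + 1 then
      PySem.List.pySetD res 0 (PySem.List.pyGetD res 0 0 + 1) else res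
  let res := if ia.2 == PySem.List.pyGetD [2,1,2,3,2,4,2,5] (PySem.Int.mod ia.1 8) 0 then
      PySem.List.pySetD res 1 (PySem.List.pyGetD res 1 0 + 1) else res
  if ia.2 == PySem.List.pyGetD [3,3,1,1,2,2,4,4,5,5] (PySem.Int.mod ia.1 10) 0 then
      PySem.List.pySetD res 2 (PySem.List.pyGetD res 2 0 + 1) else res

-- A's 'while m in res' selection loop; the fuel only makes it total: when 0 < m each
-- iteration zeroes an entry equal to m of the 3-element res, so at most 3 iterations run
-- (when m = 0 the Python loop never terminates — excluded by Pre_solution).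
def pvWhileA (m : Int) : List Int → List Int → Nat → List Int
  | _, answer, 0 => answer
  | res, answer, fuel + 1 =>
    if m ∈ res then
      match PySem.List.index? res m with
      | some idx => pvWhileA m (PySem.List.pySetD res (idx : Int) 0) (answer ++ [(idx : Int) + 1]) fuel
      | none => answer
    else answer

def solution (answers : List Int) : List Int :=
  let res : List Int := [0, 0, 0]
  let res := (PySem.List.enumerate answers).foldl pvStepA res
  let m := (PySem.List.max? res (fun y => y)).getD 0
  pvWhileA m res [] 3

-- ===== PORT B =====
def solution_alt (answers : List Int) : List Int :=
  let patterns : List (List Int) := [[1,2,3,4,5], [2,1,2,3,2,4,2,5], [3,3,1,1,2,2,4,4,5,5]]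
  let scores := patterns.map (fun p =>
    (PySem.List.enumerate answers).foldl
      (fun s ia => if ia.2 == PySem.List.pyGetD p (PySem.Int.mod ia.1 (PySem.List.len p)) 0 then s + 1 else s) (0 : Int))
  let best := (PySem.List.max? scores (fun y => y)).getD 0
  ((PySem.List.pyRange 0 3 1).filter (fun i => PySem.List.pyGetD scores i 0 == best)).map (fun i => i + 1)

-- ===== PRECONDITION & SPEC =====
-- Pre_ excludes exactly the inputs on which no answer matches any of the three periodic
-- patterns at its position: there all three scores are 0, max(res) = 0, and A's
-- 'while m in res' loop (which zeroes the found entry) never terminates.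
def Pre_solution (answers : List Int) : Prop :=
  ∃ ia ∈ PySem.List.enumerate answers,
    ia.2 = PySem.Int.mod ia.1 5 + 1 ∨
    ia.2 = PySem.List.pyGetD [2,1,2,3,2,4,2,5] (PySem.Int.mod ia.1 8) 0 ∨
    ia.2 = PySem.List.pyGetD [3,3,1,1,2,2,4,4,5,5] (PySem.Int.mod ia.1 10) 0

instance (answers : List Int) : Decidable (Pre_solution answers) := by
  unfold Pre_solution; infer_instance

def pvWitness_solution : List Int := ([1])

def Spec_solution (answers : List Int) (out : List Int) : Prop := out = solution_alt answers
instance (answers : List Int) (out : List Int) : Decidable (Spec_solution answers out) := by unfold Spec_solution; infer_instance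

-- ===== CLAIM (what is proved, stated in full; the proofs are below) =====
def Claim_equal_solution : Prop := ∀ (answers : List Int), Dom_solution answers → Pre_solution answers → Spec_solution answers (solution answers)

-- ===== LEMMAS AND PROOFS =====

-- the three match conditions of A, as Boolean predicates on (index, answer) pairs
def pvC1 (ia : Int × Int) : Bool := ia.2 == PySem.Int.mod ia.1 5 + 1
def pvC2 (ia : Int × Int) : Bool := ia.2 == PySem.List.pyGetD [2,1,2,3,2,4,2,5] (PySem.Int.mod ia.1 8) 0
def pvC3 (ia : Int × Int) : Bool := ia.2 == PySem.List.pyGetD [3,3,1,1,2,2,4,4,5,5] (PySem.Int.mod ia.1 10) 0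

theorem pvStepA_eval (x y z : Int) (ia : Int × Int) :
    pvStepA [x, y, z] ia =
      [x + (if pvC1 ia then 1 else 0), y + (if pvC2 ia then 1 else 0), z + (if pvC3 ia then 1 else 0)] := by
  unfold pvStepA pvC1 pvC2 pvC3
  cases (ia.2 == PySem.Int.mod ia.1 5 + 1) <;>
  cases (ia.2 == PySem.List.pyGetD [2,1,2,3,2,4,2,5] (PySem.Int.mod ia.1 8) 0) <;>
  cases (ia.2 == PySem.List.pyGetD [3,3,1,1,2,2,4,4,5,5] (PySem.Int.mod ia.1 10) 0) <;>
  simp [PySem.List.pySetD, PySem.List.pySet?, PySem.List.pyGetD, PySem.List.pyGet?, PySem.List.pyIdx?]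

theorem pvFoldA_eq (l : List (Int × Int)) (x y z : Int) :
    l.foldl pvStepA [x, y, z] =
      [x + (l.countP pvC1 : Int), y + (l.countP pvC2 : Int), z + (l.countP pvC3 : Int)] := by
  induction l generalizing x y z with
  | nil => simp
  | cons p l ih =>
    simp only [List.foldl_cons, pvStepA_eval, ih, List.countP_cons]
    cases pvC1 p <;> cases pvC2 p <;> cases pvC3 p <;> simp <;> omega

-- [1,2,3,4,5][i % 5] = i % 5 + 1 (the first pattern, written as a list in B and as arithmetic in A)
theorem pvPat1 (i : Int) :
    PySem.List.pyGetD [1,2,3,4,5] (PySem.Int.mod i 5) 0 = PySem.Int.mod i 5 + 1 := by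
  have h0 := PySem.Int.mod_nonneg i (b := 5) (by norm_num)
  have h5 := PySem.Int.mod_lt i (b := 5) (by norm_num)
  set m := PySem.Int.mod i 5 with hm
  have h : m = 0 ∨ m = 1 ∨ m = 2 ∨ m = 3 ∨ m = 4 := by omega
  rcases h with h|h|h|h|h <;> rw [h] <;> decide

-- A's destructive selection loop on a 3-element res equals B's filter, for any m ≠ 0
theorem pvSel (x y z m : Int) (h0 : 0 < m) :
    pvWhileA m [x, y, z] [] 3 =
      ((PySem.List.pyRange 0 3 1).filter (fun i => PySem.List.pyGetD [x, y, z] i 0 == m)).map (fun i => i + 1) := by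
  have hr : PySem.List.pyRange 0 3 1 = [0, 1, 2] := by decide
  have hm0 : (0 : Int) ≠ m := by omega
  by_cases hx : x = m <;> by_cases hy : y = m <;> by_cases hz : z = m <;>
    simp only [hr, hx, hy, hz] <;>
    simp [pvWhileA, PySem.List.index?_eq_idxOf?, List.idxOf?, List.findIdx?_cons,
      PySem.List.pySetD, PySem.List.pySet?, PySem.List.pyIdx?,
      PySem.List.pyGetD, PySem.List.pyGet?, hx, hy, hz, hm0]

theorem solution_eq (answers : List Int) (hPre : Pre_solution answers) :
    solution answers = solution_alt answers := by
  have hB1 : (PySem.List.enumerate answers).foldl (fun s ia =>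
      if ia.2 == PySem.List.pyGetD [1,2,3,4,5] (PySem.Int.mod ia.1 (PySem.List.len ([1,2,3,4,5] : List Int))) 0
      then s + 1 else s) (0 : Int) = ((PySem.List.enumerate answers).countP pvC1 : Int) := by
    have hpt : ∀ ia ∈ PySem.List.enumerate answers,
        (ia.2 == PySem.List.pyGetD [1,2,3,4,5] (PySem.Int.mod ia.1 (PySem.List.len ([1,2,3,4,5] : List Int))) 0)
          = pvC1 ia := by
      intro ia hia
      have h5 : PySem.List.len ([1,2,3,4,5] : List Int) = (5 : Int) := by decide
      simp only [h5, pvPat1 ia.1, pvC1]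
    rw [PySem.List.foldl_if_add_one, zero_add, List.countP_congr (fun ia hia => by rw [hpt ia hia])]
  have hB2 : (PySem.List.enumerate answers).foldl (fun s ia =>
      if ia.2 == PySem.List.pyGetD [2,1,2,3,2,4,2,5] (PySem.Int.mod ia.1 (PySem.List.len ([2,1,2,3,2,4,2,5] : List Int))) 0
      then s + 1 else s) (0 : Int) = ((PySem.List.enumerate answers).countP pvC2 : Int) := by
    have hpt : ∀ ia ∈ PySem.List.enumerate answers,
        (ia.2 == PySem.List.pyGetD [2,1,2,3,2,4,2,5] (PySem.Int.mod ia.1 (PySem.List.len ([2,1,2,3,2,4,2,5] : List Int))) 0)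
          = pvC2 ia := by
      intro ia _
      have h8 : PySem.List.len ([2,1,2,3,2,4,2,5] : List Int) = (8 : Int) := by decide
      simp only [h8, pvC2]
    rw [PySem.List.foldl_if_add_one, zero_add, List.countP_congr (fun ia hia => by rw [hpt ia hia])]
  have hB3 : (PySem.List.enumerate answers).foldl (fun s ia =>
      if ia.2 == PySem.List.pyGetD [3,3,1,1,2,2,4,4,5,5] (PySem.Int.mod ia.1 (PySem.List.len ([3,3,1,1,2,2,4,4,5,5] : List Int))) 0
      then s + 1 else s) (0 : Int) = ((PySem.List.enumerate answers).countP pvC3 : Int) := by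
    have hpt : ∀ ia ∈ PySem.List.enumerate answers,
        (ia.2 == PySem.List.pyGetD [3,3,1,1,2,2,4,4,5,5] (PySem.Int.mod ia.1 (PySem.List.len ([3,3,1,1,2,2,4,4,5,5] : List Int))) 0)
          = pvC3 ia := by
      intro ia _
      have h10 : PySem.List.len ([3,3,1,1,2,2,4,4,5,5] : List Int) = (10 : Int) := by decide
      simp only [h10, pvC3]
    rw [PySem.List.foldl_if_add_one, zero_add, List.countP_congr (fun ia hia => by rw [hpt ia hia])]
  have hpos : 0 < max (max ((PySem.List.enumerate answers).countP pvC1 : Int)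
      ((PySem.List.enumerate answers).countP pvC2 : Int)) ((PySem.List.enumerate answers).countP pvC3 : Int) := by
    obtain ⟨ia, hia, hc⟩ := hPre
    rcases hc with h | h | h
    · have : 0 < (PySem.List.enumerate answers).countP pvC1 :=
        List.countP_pos_iff.mpr ⟨ia, hia, by simp [pvC1, h]⟩
      omega
    · have : 0 < (PySem.List.enumerate answers).countP pvC2 :=
        List.countP_pos_iff.mpr ⟨ia, hia, by simp [pvC2, h]⟩
      omega
    · have : 0 < (PySem.List.enumerate answers).countP pvC3 :=
        List.countP_pos_iff.mpr ⟨ia, hia, by simp [pvC3, h]⟩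
      omega
  simp only [solution, solution_alt, List.map]
  simp only [hB1, hB2, hB3, pvFoldA_eq]
  simp only [zero_add, PySem.List.max?_id_cons, List.foldl, Option.getD_some]
  exact pvSel _ _ _ _ hpos

-- ===== VERDICT (by name: the statement is the Claim_ definition above) =====
theorem solution_spec : Claim_equal_solution := by
  intro answers _ hPre
  unfold Spec_solution
  exact solution_eq answers hPre
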